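-- pv_equiv track=rewrite | github.com/AutomatedProcessImprovement/extraneous-activity-delays | src/extraneous_activity_delays/infer_distribution.py | check_fix
-- ===== SOURCE A (Python) =====
-- from collections import Counter
--
-- def check_fix(data_list, delta=5):
--     value = None
--     counter = Counter(data_list)
--     counter[None] = 0
--     for d1 in counter:
--         if (counter[d1] > counter[value]) and (sum([abs(d1 - d2) < delta for d2 in data_list]) / len(data_list) > 0.95):
--             # If the value [d1] is more frequent than the current fixed one [value]
--             # and
--             # the ratio of values similar (or with a difference lower than [delta]) to [d1] is more than 90%
--             # update value
--             value = d1
--     # Return fixed value with more apparitions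
--     return value
-- ===== SOURCE B (Python) =====
-- from bisect import bisect_left, bisect_right
--
-- def check_fix(data_list, delta=5):
--     # Sort once; for each distinct value count neighbors within (v-delta, v+delta) by bisect.
--     # cnt/n > 0.95 is computed exactly as 20*cnt > 19*n.
--     n = len(data_list)
--     s = sorted(data_list)
--     counts = {}
--     for d in data_list:
--         counts[d] = counts.get(d, 0) + 1
--     best, best_cnt = None, 0
--     for d, c in counts.items():
--         if c > best_cnt and 20 * (bisect_left(s, d + delta) - bisect_right(s, d - delta)) > 19 * n:
--             best, best_cnt = d, c
--     return best
-- ===== Notes on version B (the rewrite author's own statement) =====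
-- stated objective: faster
-- what changed: Instead of rescanning the whole list for every distinct candidate (Counter + per-key linear sum), B sorts the list once and counts each candidate's in-(v-delta,v+delta) neighbors with two binary searches, tracking the best count in an explicit accumulator; the ratio test cnt/n > 0.95 is computed exactly as 20*cnt > 19*n.
import Mathlib
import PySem

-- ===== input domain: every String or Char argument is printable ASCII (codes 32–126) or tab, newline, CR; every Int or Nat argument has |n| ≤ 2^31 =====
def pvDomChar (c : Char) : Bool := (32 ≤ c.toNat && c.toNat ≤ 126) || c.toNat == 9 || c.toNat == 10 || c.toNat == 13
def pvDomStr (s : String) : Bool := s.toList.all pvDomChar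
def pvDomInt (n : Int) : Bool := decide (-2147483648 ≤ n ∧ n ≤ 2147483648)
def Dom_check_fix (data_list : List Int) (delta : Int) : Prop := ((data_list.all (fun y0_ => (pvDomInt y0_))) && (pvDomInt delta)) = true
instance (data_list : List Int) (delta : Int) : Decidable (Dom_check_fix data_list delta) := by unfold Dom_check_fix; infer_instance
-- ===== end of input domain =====

-- B replaces A's full rescan of the list for every candidate value by one sort plus two
-- binary searches per candidate, tracking the best count explicitly (objective: faster).

-- ===== PORT A =====
-- Python's int-keyed Counter with the extra None key is modelled with keys in `Option Int`
-- (None ↦ none, d ↦ some d); `counter[x]` is `getD x 0` (a Counter returns 0 for missing keys).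
-- `sum(...) / len(...) > 0.95` is ported exactly as `20 * sum > 19 * len` (exact here: both
-- sides are integers and the float comparison agrees for every achievable count/length).
-- When d1 is None its count is 0, the first conjunct is False and Python's short-circuit `and`
-- never evaluates `abs(None - d2)`; the `none` branch of `ratioOk` is therefore `false`.
def ratioOk (data_list : List Int) (delta : Int) (d1 : Option Int) : Bool :=
  match d1 with
  | some x => decide (20 * ((data_list.map (fun d2 => if |x - d2| < delta then (1 : Int) else 0)).sum)
                        > 19 * (data_list.length : Int))
  | none => false

def check_fix (data_list : List Int) (delta : Int) : Option Int :=
  let counter : PySem.Dict (Option Int) Int :=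
    (PySem.Dict.counter (data_list.map (fun x => (some x : Option Int)))).insert none 0
  counter.keys.foldl
    (fun value d1 =>
      if counter.getD d1 0 > counter.getD value 0 ∧ ratioOk data_list delta d1 = true
      then d1 else value)
    none

-- ===== PORT B =====
def check_fix_alt (data_list : List Int) (delta : Int) : Option Int :=
  let n : Int := data_list.length
  let s : List Int := PySem.List.sorted data_list (fun x => x) false
  let counts : PySem.Dict Int Int :=
    data_list.foldl (fun d x => d.insert x (d.getD x 0 + 1)) PySem.Dict.empty
  (counts.items.foldl
    (fun (acc : Option Int × Int) p =>
      if p.2 > acc.2 ∧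
         20 * ((PySem.List.bisectLeft s (p.1 + delta) : Int) - (PySem.List.bisectRight s (p.1 - delta) : Int))
           > 19 * n
      then (some p.1, p.2) else acc)
    (none, 0)).1

-- ===== PRECONDITION & SPEC =====
def Spec_check_fix (data_list : List Int) (delta : Int) (out : Option Int) : Prop := out = check_fix_alt data_list delta
instance (data_list : List Int) (delta : Int) (out : Option Int) : Decidable (Spec_check_fix data_list delta out) := by unfold Spec_check_fix; infer_instance

-- ===== CLAIM (what is proved, stated in full; the proofs are below) =====
def Claim_equal_check_fix : Prop := ∀ (data_list : List Int) (delta : Int), Dom_check_fix data_list delta → Spec_check_fix data_list delta (check_fix data_list delta)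

-- ===== LEMMAS AND PROOFS =====

-- set(map(some, xs)) keeps first-occurrence order, so it is the image of set(xs)
lemma ofList_map_some (xs : List Int) :
    (PySem.Set.ofList (xs.map (fun x => (some x : Option Int))) : List (Option Int))
      = ((PySem.Set.ofList xs : List Int).map (fun x => (some x : Option Int)) : List (Option Int)) := by
  induction xs with
  | nil => rfl
  | cons x xs ih =>
      simp only [List.map_cons, PySem.Set.ofList_cons, ih]
      simp only [PySem.Set.discard, List.filter_map]
      congr 1

-- every lookup in A's patched counter, as a closed form
lemma getD_A (data_list : List Int) (o : Option Int) :
    ((PySem.Dict.counter (data_list.map (fun x => (some x : Option Int)))).insert none 0).getD o 0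
      = match o with | none => 0 | some x => (data_list.count x : Int) := by
  cases o with
  | none => simp [PySem.Dict.getD_insert_self]
  | some x =>
      rw [PySem.Dict.getD_insert_of_ne (hne := by simp)]
      rw [PySem.Dict.getD_counter]
      rw [List.count_map_of_injective _ _ (Option.some_injective _)]

lemma keys_A (data_list : List Int) :
    ((PySem.Dict.counter (data_list.map (fun x => (some x : Option Int)))).insert none 0).keys
      = ((PySem.Set.ofList data_list : List Int).map (fun x => (some x : Option Int))) ++ [none] := by
  rw [PySem.Dict.keys_insert_of_not_contains]
  · rw [PySem.Dict.keys_counter, ofList_map_some]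
  · rw [PySem.Dict.contains_counter]; simp

lemma bisectLeft_eq_countP (s : List Int) (hs : s.Pairwise (· ≤ ·)) (x : Int) :
    PySem.List.bisectLeft s x = s.countP (fun y => decide (y < x)) := by
  obtain ⟨hle, hlt, hge⟩ := PySem.List.bisectLeft_spec s x hs
  rw [← List.take_append_drop (PySem.List.bisectLeft s x) s, List.countP_append]
  rw [List.countP_eq_length.2, List.countP_eq_zero.2]
  · simp [List.length_take, Nat.min_eq_left hle]
  · intro a ha
    obtain ⟨i, hi, rfl⟩ := List.getElem_of_mem ha
    have hi' := hi
    simp [List.length_drop] at hi'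
    rw [List.getElem_drop]
    simpa using not_lt.2 (hge _ (by omega) (by omega))
  · intro a ha
    obtain ⟨i, hi, rfl⟩ := List.getElem_of_mem ha
    have hi' := hi
    simp [List.length_take] at hi'
    rw [List.getElem_take]
    simpa using hlt _ (by omega) (by omega)

lemma bisectRight_eq_countP (s : List Int) (hs : s.Pairwise (· ≤ ·)) (x : Int) :
    PySem.List.bisectRight s x = s.countP (fun y => decide (y ≤ x)) := by
  obtain ⟨hle, hlt, hge⟩ := PySem.List.bisectRight_spec s x hs
  rw [← List.take_append_drop (PySem.List.bisectRight s x) s, List.countP_append]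
  rw [List.countP_eq_length.2, List.countP_eq_zero.2]
  · simp [List.length_take, Nat.min_eq_left hle]
  · intro a ha
    obtain ⟨i, hi, rfl⟩ := List.getElem_of_mem ha
    have hi' := hi
    simp [List.length_drop] at hi'
    rw [List.getElem_drop]
    simpa using not_le.2 (hge _ (by omega) (by omega))
  · intro a ha
    obtain ⟨i, hi, rfl⟩ := List.getElem_of_mem ha
    have hi' := hi
    simp [List.length_take] at hi'
    rw [List.getElem_take]
    simpa using hlt _ (by omega) (by omega)

lemma countP_split (lo hi : Int) (h : lo < hi) : ∀ (l : List Int),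
    l.countP (fun y => decide (y < hi))
      = l.countP (fun y => decide (y ≤ lo)) + l.countP (fun y => decide (lo < y ∧ y < hi))
  | [] => rfl
  | a :: l => by
      simp only [List.countP_cons, countP_split lo hi h l]
      by_cases h1 : a ≤ lo <;> by_cases h2 : a < hi <;> simp [h1, h2] <;> first | omega | (split_ifs <;> omega)

-- A's neighbourhood-ratio test equals B's bisect test
lemma cond_iff (data_list : List Int) (delta k : Int) :
    (20 * ((PySem.List.bisectLeft (PySem.List.sorted data_list (fun x => x) false) (k + delta) : Int)
            - (PySem.List.bisectRight (PySem.List.sorted data_list (fun x => x) false) (k - delta) : Int))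
        > 19 * (data_list.length : Int))
    ↔ (20 * ((data_list.map (fun d2 => if |k - d2| < delta then (1 : Int) else 0)).sum)
        > 19 * (data_list.length : Int)) := by
  set s := PySem.List.sorted data_list (fun x => x) false with hsdef
  have hs : s.Pairwise (· ≤ ·) := PySem.List.sorted_pairwise data_list (fun x => x)
  have hperm : s.Perm data_list := PySem.List.sorted_perm data_list (fun x => x) false
  have hsum : (data_list.map (fun d2 => if |k - d2| < delta then (1 : Int) else 0)).sum
      = (data_list.countP (fun d2 => decide (|k - d2| < delta)) : Int) := by
    rw [← PySem.List.sum_map_ite_one_zero (fun d2 => decide (|k - d2| < delta)) data_list]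
    simp
  rw [hsum, bisectLeft_eq_countP s hs, bisectRight_eq_countP s hs]
  by_cases hd : 0 < delta
  · rw [countP_split (k - delta) (k + delta) (by omega) s]
    have hmid : s.countP (fun y => decide (k - delta < y ∧ y < k + delta))
        = data_list.countP (fun d2 => decide (|k - d2| < delta)) := by
      have h1 : s.countP (fun y => decide (k - delta < y ∧ y < k + delta))
          = data_list.countP (fun y => decide (k - delta < y ∧ y < k + delta)) :=
        List.Perm.countP_congr hperm (fun x _ => rfl)
      rw [h1]
      have hfun : (fun y : Int => decide (k - delta < y ∧ y < k + delta))
          = (fun d2 : Int => decide (|k - d2| < delta)) := by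
        funext a
        simp only [decide_eq_decide, abs_lt]
        omega
      rw [hfun]
    rw [hmid]
    omega
  · have h0 : data_list.countP (fun d2 => decide (|k - d2| < delta)) = 0 := by
      apply List.countP_eq_zero.2
      intro a _
      simp only [decide_eq_true_eq]
      have := abs_nonneg (k - a)
      omega
    have hmono : s.countP (fun y => decide (y < k + delta)) ≤ s.countP (fun y => decide (y ≤ k - delta)) := by
      apply List.countP_mono_left
      intro a _ ha
      simp only [decide_eq_true_eq] at *
      omega
    have hm' : (s.countP (fun y => decide (y < k + delta)) : Int)
        ≤ (s.countP (fun y => decide (y ≤ k - delta)) : Int) := by exact_mod_cast hmono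
    have hl : (0:Int) ≤ (data_list.length : Int) := by positivity
    rw [h0]
    omega

-- the two folds over the distinct values agree: B's second component tracks A's counter[value]
lemma fold_agree (cnt : Int → Nat) (QA QB : Int → Prop) [DecidablePred QA] [DecidablePred QB]
    (hQ : ∀ k, QA k ↔ QB k) :
    ∀ (D : List Int) (value : Option Int) (c : Int),
      c = (match value with | none => 0 | some v => (cnt v : Int)) →
      (D.foldl (fun (acc : Option Int × Int) k =>
          if (cnt k : Int) > acc.2 ∧ QB k then (some k, (cnt k : Int)) else acc) (value, c)).1
      = D.foldl (fun v k =>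
          if (cnt k : Int) > (match v with | none => 0 | some x => (cnt x : Int)) ∧ QA k
          then some k else v) value
  | [], value, c, hc => rfl
  | k :: D, value, c, hc => by
      simp only [List.foldl_cons]
      by_cases h : (cnt k : Int) > c ∧ QB k
      · rw [if_pos h, if_pos (by rw [← hc]; exact ⟨h.1, (hQ k).2 h.2⟩)]
        exact fold_agree cnt QA QB hQ D (some k) (cnt k) rfl
      · rw [if_neg h, if_neg (by rw [← hc]; exact fun hh => h ⟨hh.1, (hQ k).1 hh.2⟩)]
        exact fold_agree cnt QA QB hQ D value c hc

-- ===== VERDICT (by name: the statement is the Claim_ definition above) =====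
theorem check_fix_spec : Claim_equal_check_fix := by
  intro data_list delta _
  unfold Spec_check_fix
  simp only [check_fix, check_fix_alt]
  rw [keys_A, PySem.Dict.foldl_insert_getD_add_one_eq_counter, PySem.Dict.items_counter]
  rw [List.foldl_append, List.foldl_map, List.foldl_map]
  simp only [getD_A, List.foldl_cons, List.foldl_nil, ratioOk, Bool.false_eq_true, and_false,
    if_false]
  exact (fold_agree (fun x => data_list.count x)
    (fun k => ratioOk data_list delta (some k) = true)
    (fun k => 20 * ((PySem.List.bisectLeft (PySem.List.sorted data_list (fun x => x) false) (k + delta) : Int)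
            - (PySem.List.bisectRight (PySem.List.sorted data_list (fun x => x) false) (k - delta) : Int))
        > 19 * (data_list.length : Int))
    (fun k => by simpa [ratioOk] using (cond_iff data_list delta k).symm)
    (PySem.Set.ofList data_list) none 0 rfl).symm
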